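-- pv_equiv track=rewrite | github.com/1Jayakrishnan/GFG--POTD | GFG NOV 2023/Predict the Column.py | columnWithMaxZeros
-- ===== SOURCE A (Python) =====
-- def columnWithMaxZeros(arr,N):
--     # code here
--     max_zeros_count = 0  # Track the maximum number of zeros
--     max_zeros_column = -1  # Track the column with the maximum number of zeros
--
--     for j in range(N):  # Iterate through each column
--         zeros_count = 0  # Count of zeros in the current column
--
--         for i in range(N):  # Iterate through each row in the current column
--             if arr[i][j] == 0:
--                 zeros_count += 1
--
--         # Update max_zeros_column if the current column has more zeros
--         if zeros_count > max_zeros_count: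
--             max_zeros_count = zeros_count
--             max_zeros_column = j
--
--     return max_zeros_column
-- ===== SOURCE B (Python) =====
-- def columnWithMaxZeros(arr, N):
--     # Row-major two-pass: build the full per-column zero-count table first,
--     # then select the first column with the strictly largest positive count.
--     counts = [0] * N
--     for i in range(N):
--         row = arr[i]
--         counts = [counts[j] + (1 if row[j] == 0 else 0) for j in range(N)]
--     best = 0
--     col = -1
--     for j in range(len(counts)):
--         if counts[j] > best:
--             best = counts[j]
--             col = j
--     return col
-- ===== Notes on version B (the rewrite author's own statement) =====
-- stated objective: alternative
-- what changed: A computes each column's zero count on demand (column-major nested loops) and compares as it goes; B traverses the matrix row-major building a complete per-column count table, then runs a separate selection pass over the table.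
import Mathlib
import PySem

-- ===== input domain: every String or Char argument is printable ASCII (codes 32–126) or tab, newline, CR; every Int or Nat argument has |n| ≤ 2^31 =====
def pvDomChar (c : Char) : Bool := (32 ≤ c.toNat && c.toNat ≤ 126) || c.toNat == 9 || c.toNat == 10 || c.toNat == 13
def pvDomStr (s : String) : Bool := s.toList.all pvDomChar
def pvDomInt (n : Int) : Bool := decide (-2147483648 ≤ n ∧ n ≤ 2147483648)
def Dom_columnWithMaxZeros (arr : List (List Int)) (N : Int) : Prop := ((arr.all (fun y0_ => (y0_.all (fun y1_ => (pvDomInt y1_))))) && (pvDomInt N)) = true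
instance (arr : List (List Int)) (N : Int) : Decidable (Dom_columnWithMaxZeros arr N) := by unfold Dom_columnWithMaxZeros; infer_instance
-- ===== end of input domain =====

-- ===== PORT A =====
-- B changes the decomposition: A below computes each column's zero count column-major,
-- on demand, and compares as it goes; B builds the full per-column count table row-major
-- and then selects in a separate pass.  (pyGetD defaults are unreachable under Pre_.)

-- inner loop of A: zeros in column j over rows 0..N-1
def zerosInColA (arr : List (List Int)) (N j : Int) : Int :=
  (PySem.List.pyRange 0 N 1).foldl
    (fun z i => if PySem.List.pyGetD (PySem.List.pyGetD arr i []) j 1 == 0 then z + 1 else z) 0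

def columnWithMaxZeros (arr : List (List Int)) (N : Int) : Int :=
  ((PySem.List.pyRange 0 N 1).foldl
    (fun (st : Int × Int) j =>
      let zc := zerosInColA arr N j
      if zc > st.1 then (zc, j) else st) (0, -1)).2

-- ===== PORT B =====
def columnWithMaxZeros_alt (arr : List (List Int)) (N : Int) : Int :=
  -- counts = [0]*N  (Python yields [] for N ≤ 0, matched by toNat)
  let counts0 : List Int := List.replicate N.toNat 0
  -- for i in range(N): counts = [counts[j] + (1 if arr[i][j]==0 else 0) for j in range(N)]
  let counts := (PySem.List.pyRange 0 N 1).foldl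
    (fun counts i =>
      let row := PySem.List.pyGetD arr i []
      (PySem.List.pyRange 0 N 1).map
        (fun j => PySem.List.pyGetD counts j 0 +
                  if PySem.List.pyGetD row j 0 == 0 then 1 else 0))
    counts0
  -- selection pass: first column with the strictly largest positive count
  ((PySem.List.pyRange 0 (counts.length : Int) 1).foldl
    (fun (st : Int × Int) j =>
      if PySem.List.pyGetD counts j 0 > st.1 then (PySem.List.pyGetD counts j 0, j) else st)
    (0, -1)).2

-- ===== PRECONDITION & SPEC =====
-- Pre_ excludes exactly the inputs on which Python A raises IndexError:
-- it reads arr[i][j] for all 0 ≤ i, j < N, so the first N rows must exist and have length ≥ N.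
def Pre_columnWithMaxZeros (arr : List (List Int)) (N : Int) : Prop :=
  N ≤ (arr.length : Int) ∧ ∀ row ∈ arr.take N.toNat, N ≤ (row.length : Int)
instance (arr : List (List Int)) (N : Int) : Decidable (Pre_columnWithMaxZeros arr N) := by
  unfold Pre_columnWithMaxZeros; infer_instance

def pvWitness_columnWithMaxZeros : List (List Int) × Int := ([[0, 1], [1, 0]], 2)

def Spec_columnWithMaxZeros (arr : List (List Int)) (N : Int) (out : Int) : Prop := out = columnWithMaxZeros_alt arr N
instance (arr : List (List Int)) (N : Int) (out : Int) : Decidable (Spec_columnWithMaxZeros arr N out) := by unfold Spec_columnWithMaxZeros; infer_instance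

-- ===== CLAIM (what is proved, stated in full; the proofs are below) =====
def Claim_equal_columnWithMaxZeros : Prop := ∀ (arr : List (List Int)) (N : Int), Dom_columnWithMaxZeros arr N → Pre_columnWithMaxZeros arr N → Spec_columnWithMaxZeros arr N (columnWithMaxZeros arr N)

-- ===== LEMMAS AND PROOFS =====

-- shifting the start value of a counting fold
theorem countFold_shift (P : Int → Bool) (rs : List Int) (s : Int) :
    rs.foldl (fun z i => if P i then z + 1 else z) s
      = s + rs.foldl (fun z i => if P i then z + 1 else z) 0 := by
  induction rs generalizing s with
  | nil => simp
  | cons i rs ih =>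
    simp only [List.foldl_cons]
    rw [ih (if P i then s + 1 else s), ih (if P i then 0 + 1 else 0)]
    split_ifs <;> ring

-- B's row-major table fold computes, per column j, the count of rows i with P i j
theorem counts_fold (N : Int) (P : Int → Int → Bool) (rs : List Int) (f : Int → Int) :
    rs.foldl
      (fun counts i =>
        (PySem.List.pyRange 0 N 1).map
          (fun j => PySem.List.pyGetD counts j 0 + if P i j then 1 else 0))
      ((PySem.List.pyRange 0 N 1).map f)
    = (PySem.List.pyRange 0 N 1).map
        (fun j => f j + rs.foldl (fun z i => if P i j then z + 1 else z) 0) := by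
  induction rs generalizing f with
  | nil => simp
  | cons i rs ih =>
    simp only [List.foldl_cons]
    have hmap :
        (PySem.List.pyRange 0 N 1).map
          (fun j => PySem.List.pyGetD ((PySem.List.pyRange 0 N 1).map f) j 0 + if P i j then 1 else 0)
        = (PySem.List.pyRange 0 N 1).map (fun j => f j + if P i j then 1 else 0) := by
      apply List.map_congr_left
      intro j hj
      rw [PySem.List.mem_pyRange_one] at hj
      rw [PySem.List.pyGetD_map_pyRange_of_nonneg f N j 0 hj.1 hj.2]
    rw [hmap, ih (fun j => f j + if P i j then 1 else 0)]
    apply List.map_congr_left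
    intro j _
    rw [countFold_shift (fun i => P i j) rs (if P i j then 0 + 1 else 0)]
    split_ifs <;> ring

-- ===== VERDICT (by name: the statement is the Claim_ definition above) =====
theorem columnWithMaxZeros_spec : Claim_equal_columnWithMaxZeros := by
  intro arr N _ hpre
  obtain ⟨hrows, hcols⟩ := hpre
  unfold Spec_columnWithMaxZeros columnWithMaxZeros columnWithMaxZeros_alt
  -- name B's per-column count
  set zB : Int → Int := fun j =>
    (PySem.List.pyRange 0 N 1).foldl
      (fun z i => if PySem.List.pyGetD (PySem.List.pyGetD arr i []) j 0 == 0 then z + 1 else z) 0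
    with hzB
  have hrep : (List.replicate N.toNat (0 : Int)) = (PySem.List.pyRange 0 N 1).map (fun _ => 0) := by
    rw [List.map_const', PySem.List.length_pyRange_one]
    simp
  have hcounts :
      (PySem.List.pyRange 0 N 1).foldl
        (fun counts i =>
          (PySem.List.pyRange 0 N 1).map
            (fun j => PySem.List.pyGetD counts j 0 +
              if PySem.List.pyGetD (PySem.List.pyGetD arr i []) j 0 == 0 then 1 else 0))
        (List.replicate N.toNat 0)
      = (PySem.List.pyRange 0 N 1).map zB := by
    rw [hrep,
      counts_fold N (fun i j => PySem.List.pyGetD (PySem.List.pyGetD arr i []) j 0 == 0)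
        (PySem.List.pyRange 0 N 1) (fun _ => 0)]
    simp [hzB]
  simp only [hcounts]
  rcases (by omega : N ≤ 0 ∨ 0 < N) with hN | hN
  · -- N ≤ 0 : all ranges are empty on both sides
    rw [PySem.List.pyRange_one_eq_nil hN]
    simp
  · -- 0 < N : selection range of B is pyRange 0 N 1 as well
    have hlen : ((((PySem.List.pyRange 0 N 1).map zB).length : Nat) : Int) = N := by
      rw [List.length_map, PySem.List.length_pyRange_one]
      omega
    rw [hlen]
    -- zB agrees with A's zerosInColA on every column of the range (defaults are unreachable)
    have hz : ∀ j ∈ PySem.List.pyRange 0 N 1, zB j = zerosInColA arr N j := by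
      intro j hj
      rw [PySem.List.mem_pyRange_one] at hj
      unfold zerosInColA
      rw [hzB]
      apply PySem.List.foldl_congr_mem
      intro z i hi
      rw [PySem.List.mem_pyRange_one] at hi
      have hi' : i.toNat < arr.length := by omega
      have hrow : PySem.List.pyGetD arr i [] = arr[i.toNat] :=
        PySem.List.pyGetD_eq_getElem arr ([]) hi.1 (by omega)
      have hmem : arr[i.toNat] ∈ arr.take N.toNat := by
        rw [List.mem_take_iff_getElem]
        exact ⟨i.toNat, by omega, by simp⟩
      have hlenrow : N ≤ (arr[i.toNat].length : Int) := hcols _ hmem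
      rw [hrow,
        PySem.List.pyGetD_eq_getElem arr[i.toNat] 0 hj.1 (by omega),
        PySem.List.pyGetD_eq_getElem arr[i.toNat] 1 hj.1 (by omega)]
    -- the two selection folds agree
    have hsel :
        (PySem.List.pyRange 0 N 1).foldl
          (fun (st : Int × Int) j =>
            if PySem.List.pyGetD ((PySem.List.pyRange 0 N 1).map zB) j 0 > st.1
            then (PySem.List.pyGetD ((PySem.List.pyRange 0 N 1).map zB) j 0, j) else st)
          (0, -1)
        = (PySem.List.pyRange 0 N 1).foldl
            (fun (st : Int × Int) j =>
              let zc := zerosInColA arr N j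
              if zc > st.1 then (zc, j) else st)
            (0, -1) := by
      apply PySem.List.foldl_congr_mem
      intro st j hj
      have hj' := hj
      rw [PySem.List.mem_pyRange_one] at hj'
      rw [PySem.List.pyGetD_map_pyRange_of_nonneg zB N j 0 hj'.1 hj'.2, hz j hj]
    rw [hsel]
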